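-- pv_equiv track=rewrite | github.com/KotRikD/honkbot | utils/priviligeshelper.py | getPriviliges
-- ===== SOURCE A (Python) =====
-- USER_NORMAL = 2
--
-- USER_VIP = 128
--
-- USER_MODERATOR = 1024
--
-- USER_ADMIN = 2048
--
-- def getPriviliges(priv):
--     priviliges = [USER_VIP, USER_MODERATOR, USER_ADMIN]
--     have_priviliges = 0
--     for x in priviliges:
--         if (priv & x) > 0:
--             have_priviliges+=x
--             priv-=x
--
--     if (USER_ADMIN&have_priviliges)>0:
--         have_priviliges = USER_NORMAL+USER_VIP+USER_MODERATOR+USER_ADMIN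
--     return have_priviliges
-- ===== SOURCE B (Python) =====
-- USER_NORMAL = 2
--
-- USER_VIP = 128
--
-- USER_MODERATOR = 1024
--
-- USER_ADMIN = 2048
--
-- def getPriviliges(priv):
--     have_priviliges = priv & (USER_VIP | USER_MODERATOR | USER_ADMIN)
--     if have_priviliges & USER_ADMIN:
--         have_priviliges = USER_NORMAL + USER_VIP + USER_MODERATOR + USER_ADMIN
--     return have_priviliges
-- ===== Notes on version B (the rewrite author's own statement) =====
-- stated objective: simpler
-- what changed: Replaces the loop that tests and subtracts each flag bit one at a time with a single bitwise AND against the combined mask USER_VIP|USER_MODERATOR|USER_ADMIN, keeping only the admin override branch.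
import Mathlib
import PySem

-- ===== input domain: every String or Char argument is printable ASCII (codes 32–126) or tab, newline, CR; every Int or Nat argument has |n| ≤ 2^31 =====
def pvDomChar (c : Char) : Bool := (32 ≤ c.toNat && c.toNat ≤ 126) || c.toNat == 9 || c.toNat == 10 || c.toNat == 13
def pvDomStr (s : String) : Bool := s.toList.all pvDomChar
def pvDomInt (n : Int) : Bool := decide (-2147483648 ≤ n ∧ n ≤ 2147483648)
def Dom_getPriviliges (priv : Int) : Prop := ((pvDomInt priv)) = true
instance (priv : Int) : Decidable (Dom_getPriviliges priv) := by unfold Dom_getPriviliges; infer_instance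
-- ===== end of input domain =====

-- B replaces A's test-and-subtract loop over the flag list by one bitwise AND with the combined mask (simpler).


def USER_NORMAL : Int := 2
def USER_VIP : Int := 128
def USER_MODERATOR : Int := 1024
def USER_ADMIN : Int := 2048

-- ===== PORT A =====
-- loop over [USER_VIP, USER_MODERATOR, USER_ADMIN] with state (have_priviliges, priv)
def getPriviliges (priv : Int) : Int :=
  let priviliges : List Int := [USER_VIP, USER_MODERATOR, USER_ADMIN]
  let s := priviliges.foldl
    (fun (st : Int × Int) x =>
      if PySem.Int.band st.2 x > 0 then (st.1 + x, st.2 - x) else st)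
    (0, priv)
  let have_priviliges := s.1
  if PySem.Int.band USER_ADMIN have_priviliges > 0 then
    USER_NORMAL + USER_VIP + USER_MODERATOR + USER_ADMIN
  else have_priviliges

-- ===== PORT B =====
def getPriviliges_alt (priv : Int) : Int :=
  let have_priviliges :=
    PySem.Int.band priv (PySem.Int.bor (PySem.Int.bor USER_VIP USER_MODERATOR) USER_ADMIN)
  if PySem.Int.band have_priviliges USER_ADMIN ≠ 0 then
    USER_NORMAL + USER_VIP + USER_MODERATOR + USER_ADMIN
  else have_priviliges

-- ===== PRECONDITION & SPEC =====
def Spec_getPriviliges (priv : Int) (out : Int) : Prop := out = getPriviliges_alt priv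
instance (priv : Int) (out : Int) : Decidable (Spec_getPriviliges priv out) := by unfold Spec_getPriviliges; infer_instance

-- ===== CLAIM (what is proved, stated in full; the proofs are below) =====
def Claim_equal_getPriviliges : Prop := ∀ (priv : Int), Dom_getPriviliges priv → Spec_getPriviliges priv (getPriviliges priv)

-- ===== LEMMAS AND PROOFS =====

-- Nat: AND with a single power-of-two bit, arithmetically.
theorem nat_and_pow (n : Nat) (k : Nat) : n &&& 2 ^ k = n / 2 ^ k % 2 * 2 ^ k := by
  rw [Nat.and_two_pow]
  congr 1
  exact Nat.toNat_testBit n k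

-- Nat: AND with the combined mask 3200 = 128 + 1024 + 2048, arithmetically.
theorem nat_and_3200 (n : Nat) : n &&& 3200 = n / 128 % 2 * 128 + n / 1024 % 2 * 1024 + n / 2048 % 2 * 2048 := by
  have h : (3200 : Nat) = 128 ||| 1024 ||| 2048 := by decide
  rw [h, Nat.and_or_distrib_left, Nat.and_or_distrib_left]
  have h7 := nat_and_pow n 7
  have h10 := nat_and_pow n 10
  have h11 := nat_and_pow n 11
  norm_num at h7 h10 h11
  rw [h7, h10, h11]
  rcases Nat.mod_two_eq_zero_or_one (n / 128) with e7 | e7 <;>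
    rcases Nat.mod_two_eq_zero_or_one (n / 1024) with e10 | e10 <;>
      rcases Nat.mod_two_eq_zero_or_one (n / 2048) with e11 | e11 <;>
        simp [e7, e10, e11]

-- Python's `a & 128` as floor-div/mod arithmetic, for every Int a (two's complement on negatives).
theorem band128 (a : Int) : PySem.Int.band a 128 = a / 128 % 2 * 128 := by
  have h7 : (2 : Nat) ^ 7 = 128 := by norm_num
  rcases le_or_gt 0 a with h | h
  · rw [PySem.Int.band_of_nonneg h (by norm_num)]
    have hn := nat_and_pow a.toNat 7
    rw [h7] at hn
    rw [show (128 : Int).toNat = 128 from rfl, hn]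
    omega
  · rw [PySem.Int.band]
    simp only [not_le.mpr h, if_false, show (0:Int) ≤ 128 by norm_num, if_true]
    rw [show (128 : Int).toNat = 128 from rfl, Nat.and_comm]
    have hn := nat_and_pow (-a - 1).toNat 7
    rw [h7] at hn
    rw [hn]
    omega

theorem band1024 (a : Int) : PySem.Int.band a 1024 = a / 1024 % 2 * 1024 := by
  have h10 : (2 : Nat) ^ 10 = 1024 := by norm_num
  rcases le_or_gt 0 a with h | h
  · rw [PySem.Int.band_of_nonneg h (by norm_num)]
    have hn := nat_and_pow a.toNat 10
    rw [h10] at hn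
    rw [show (1024 : Int).toNat = 1024 from rfl, hn]
    omega
  · rw [PySem.Int.band]
    simp only [not_le.mpr h, if_false, show (0:Int) ≤ 1024 by norm_num, if_true]
    rw [show (1024 : Int).toNat = 1024 from rfl, Nat.and_comm]
    have hn := nat_and_pow (-a - 1).toNat 10
    rw [h10] at hn
    rw [hn]
    omega

theorem band2048 (a : Int) : PySem.Int.band a 2048 = a / 2048 % 2 * 2048 := by
  have h11 : (2 : Nat) ^ 11 = 2048 := by norm_num
  rcases le_or_gt 0 a with h | h
  · rw [PySem.Int.band_of_nonneg h (by norm_num)]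
    have hn := nat_and_pow a.toNat 11
    rw [h11] at hn
    rw [show (2048 : Int).toNat = 2048 from rfl, hn]
    omega
  · rw [PySem.Int.band]
    simp only [not_le.mpr h, if_false, show (0:Int) ≤ 2048 by norm_num, if_true]
    rw [show (2048 : Int).toNat = 2048 from rfl, Nat.and_comm]
    have hn := nat_and_pow (-a - 1).toNat 11
    rw [h11] at hn
    rw [hn]
    omega

-- Python's `a & 3200` as arithmetic, for every Int a.
theorem band3200 (a : Int) :
    PySem.Int.band a 3200 = a / 128 % 2 * 128 + a / 1024 % 2 * 1024 + a / 2048 % 2 * 2048 := by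
  rcases le_or_gt 0 a with h | h
  · rw [PySem.Int.band_of_nonneg h (by norm_num)]
    rw [show (3200 : Int).toNat = 3200 from rfl, nat_and_3200]
    omega
  · rw [PySem.Int.band]
    simp only [not_le.mpr h, if_false, show (0:Int) ≤ 3200 by norm_num, if_true]
    rw [show (3200 : Int).toNat = 3200 from rfl, Nat.and_comm, nat_and_3200]
    omega

-- band with the constant on the left (A tests USER_ADMIN & have_priviliges).
theorem band2048l (a : Int) : PySem.Int.band 2048 a = a / 2048 % 2 * 2048 := by
  rw [PySem.Int.band_comm, band2048]

-- ===== VERDICT (by name: the statement is the Claim_ definition above) =====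
theorem getPriviliges_spec : Claim_equal_getPriviliges := by
  intro priv _
  unfold Spec_getPriviliges getPriviliges getPriviliges_alt
  simp only [USER_NORMAL, USER_VIP, USER_MODERATOR, USER_ADMIN, List.foldl]
  rw [show PySem.Int.bor (PySem.Int.bor (128 : Int) 1024) 2048 = 3200 from by decide]
  simp only [band3200, band2048l, band128, band1024, band2048]
  split_ifs <;> dsimp only at * <;> omega
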